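-- pv_equiv track=rewrite | github.com/cole43623/numeri | prop numeri.py | is_nontotient
-- ===== SOURCE A (Python) =====
-- def is_nontotient(n):
-- 	if n != 1 and n % 2:
-- 		return True
-- 	from math import gcd
-- 	for x in range(1, 2*n):  # massimo fino al doppio
-- 		count = sum(1 for i in range(1, x+1) if gcd(i, x) == 1)
-- 		if count == n:
-- 			return False
-- 	return True
-- ===== SOURCE B (Python) =====
-- def _phi(x):
--     result = x
--     p = 2
--     while p * p <= x:
--         if x % p == 0:
--             while x % p == 0:
--                 x //= p
--             result -= result // p
--         p += 1
--     if x > 1: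
--         result -= result // x
--     return result
--
-- def is_nontotient(n):
--     if n != 1 and n % 2:
--         return True
--     return all(_phi(x) != n for x in range(1, 2 * n))
-- ===== Notes on version B (the rewrite author's own statement) =====
-- stated objective: alternative
-- what changed: phi(x) is computed by trial-division prime factorization (multiplicative formula) instead of counting coprime residues with gcd, and the early-return scan becomes a single all(...) over the same range.
import Mathlib
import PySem

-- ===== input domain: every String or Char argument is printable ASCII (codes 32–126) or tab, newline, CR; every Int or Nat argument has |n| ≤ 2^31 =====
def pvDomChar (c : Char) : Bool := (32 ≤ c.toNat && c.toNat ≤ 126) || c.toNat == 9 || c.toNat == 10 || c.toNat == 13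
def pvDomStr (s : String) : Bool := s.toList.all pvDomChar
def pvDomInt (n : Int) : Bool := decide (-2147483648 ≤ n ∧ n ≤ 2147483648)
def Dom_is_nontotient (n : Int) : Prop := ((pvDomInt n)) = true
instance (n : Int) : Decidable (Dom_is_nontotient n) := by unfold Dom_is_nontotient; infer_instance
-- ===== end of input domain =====

-- B computes each totient by trial-division prime factorization instead of A's per-element gcd count; same results.

-- ===== PORT A =====
-- count = sum(1 for i in range(1, x+1) if gcd(i, x) == 1)
def pvCountA (x : Int) : Int :=
  ((PySem.List.pyRange 1 (x + 1) 1).countP (fun i => Int.gcd i x == 1) : Int)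

-- for x in range(1, 2*n): if count == n: return False ... return True
def pvLoopA (n : Int) : List Int → Bool
  | [] => true
  | x :: rest => if pvCountA x = n then false else pvLoopA n rest

def is_nontotient (n : Int) : Bool :=
  if n ≠ 1 ∧ PySem.Int.mod n 2 ≠ 0 then true
  else pvLoopA n (PySem.List.pyRange 1 (2 * n) 1)

-- ===== PORT B =====
-- _phi is only ever called with x ≥ 1 (and p ≥ 2), so the Nat arithmetic below is exactly
-- Python's int arithmetic there; the extra conjuncts in the guards only make the loops total.

-- inner 'while x % p == 0: x //= p'
def pvStrip (x p : Nat) : Nat :=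
  if h : 2 ≤ p ∧ 0 < x ∧ x % p = 0 then pvStrip (x / p) p else x
termination_by x
decreasing_by exact Nat.div_lt_self h.2.1 (by omega)

lemma pvStrip_le (x p : Nat) : pvStrip x p ≤ x := by
  induction x using Nat.strong_induction_on with
  | _ x IH =>
    rw [pvStrip]
    split
    · rename_i h
      exact le_trans (IH _ (Nat.div_lt_self h.2.1 (by omega))) (Nat.div_le_self _ _)
    · exact le_rfl

-- outer 'while p * p <= x: ...', carrying (x, result)
def pvPhiLoop (x result p : Nat) : Nat × Nat :=
  if h : p * p ≤ x ∧ 2 ≤ p then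
    if x % p = 0 then
      pvPhiLoop (pvStrip x p) (result - result / p) (p + 1)
    else
      pvPhiLoop x result (p + 1)
  else (x, result)
termination_by x + 1 - p
decreasing_by
  · have hS := pvStrip_le x p
    have hpx : p ≤ x := le_trans (Nat.le_mul_of_pos_left p (by omega)) h.1
    omega
  · have hpx : p ≤ x := le_trans (Nat.le_mul_of_pos_left p (by omega)) h.1
    omega

def pvPhiNat (x : Nat) : Nat :=
  let pr := pvPhiLoop x x 2
  if 1 < pr.1 then pr.2 - pr.2 / pr.1 else pr.2

def pvPhi (x : Int) : Int := (pvPhiNat x.toNat : Int)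

def is_nontotient_alt (n : Int) : Bool :=
  if n ≠ 1 ∧ PySem.Int.mod n 2 ≠ 0 then true
  else (PySem.List.pyRange 1 (2 * n) 1).all (fun x => pvPhi x != n)

-- ===== PRECONDITION & SPEC =====
def Spec_is_nontotient (n : Int) (out : Bool) : Prop := out = is_nontotient_alt n
instance (n : Int) (out : Bool) : Decidable (Spec_is_nontotient n out) := by unfold Spec_is_nontotient; infer_instance

-- ===== CLAIM (what is proved, stated in full; the proofs are below) =====
def Claim_equal_is_nontotient : Prop := ∀ (n : Int), Dom_is_nontotient n → Spec_is_nontotient n (is_nontotient n)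

-- ===== LEMMAS AND PROOFS =====

def pvFinish (pr : Nat × Nat) : Nat := if 1 < pr.1 then pr.2 - pr.2 / pr.1 else pr.2

lemma pvStrip_spec (p : Nat) (hp : 2 ≤ p) :
    ∀ x, 0 < x → ∃ k, x = pvStrip x p * p ^ k ∧ ¬ p ∣ pvStrip x p ∧ 0 < pvStrip x p := by
  intro x
  induction x using Nat.strong_induction_on with
  | _ x IH =>
    intro hx
    rw [pvStrip]
    split
    · rename_i h
      have hdvd : p ∣ x := Nat.dvd_of_mod_eq_zero h.2.2
      have hlt : x / p < x := Nat.div_lt_self hx (by omega)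
      have hpos : 0 < x / p := Nat.div_pos (Nat.le_of_dvd hx hdvd) (by omega)
      obtain ⟨k, hk, hnd, hq⟩ := IH _ hlt hpos
      refine ⟨k + 1, ?_, hnd, hq⟩
      rw [pow_succ, ← mul_assoc, ← hk, Nat.div_mul_cancel hdvd]
    · rename_i h
      refine ⟨0, by simp, ?_, hx⟩
      intro hd
      exact h ⟨hp, hx, Nat.mod_eq_zero_of_dvd hd⟩

lemma pvPhiLoop_spec : ∀ x r p, 2 ≤ p → 0 < x → (∀ q, Nat.Prime q → q ∣ x → p ≤ q) →
    ∀ a, 0 < a → r = a * x → pvFinish (pvPhiLoop x r p) = a * Nat.totient x := by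
  intro x r p
  induction x, r, p using pvPhiLoop.induct with
  | case1 x r p h h2 IH =>
    intro hp hx hfac a ha hr
    rw [pvPhiLoop, dif_pos h, if_pos h2]
    obtain ⟨k, hxS, hndvd, hSpos⟩ := pvStrip_spec p hp x hx
    set S := pvStrip x p with hSdef
    have hpdvd : p ∣ x := Nat.dvd_of_mod_eq_zero h2
    -- p is prime: its least prime factor divides x, hence is ≥ p, hence = p
    have hpprime : p.Prime := by
      have h1 : p.minFac ∣ x := (Nat.minFac_dvd p).trans hpdvd
      have h2' := hfac p.minFac (Nat.minFac_prime (by omega)) h1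
      have h3 := Nat.minFac_le (show 0 < p by omega)
      have h4 : p.minFac = p := le_antisymm h3 h2'
      rw [← h4]; exact Nat.minFac_prime (by omega)
    obtain ⟨k', rfl⟩ : ∃ k', k = k' + 1 := by
      rcases Nat.eq_zero_or_pos k with h0 | h1
      · exfalso; apply hndvd; rw [h0, pow_zero, mul_one] at hxS; rwa [← hxS]
      · exact ⟨k - 1, by omega⟩
    have hk1 : 1 ≤ k' + 1 := by omega
    have hrr : r = a * S * p ^ k' * p := by
      rw [hr, hxS, pow_succ]; ring
    have hrp : r / p = a * S * p ^ k' := by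
      rw [hrr, Nat.mul_div_cancel _ (by omega : 0 < p)]
    have hstep : r - r / p = (a * Nat.totient (p ^ (k' + 1))) * S := by
      rw [Nat.totient_prime_pow hpprime hk1]
      rw [hrp, hrr]
      have h5 : a * S * p ^ k' * p - a * S * p ^ k'
          = a * S * p ^ k' * (p - 1) := by
        rw [Nat.mul_sub, mul_one]
      rw [h5, Nat.add_sub_cancel]; ring
    have hfac' : ∀ q, Nat.Prime q → q ∣ S → p + 1 ≤ q := by
      intro q hq hqS
      have hqx : q ∣ x := by rw [hxS]; exact hqS.mul_right _
      have := hfac q hq hqx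
      rcases Nat.lt_or_ge p q with hlt | hge
      · omega
      · have : q = p := le_antisymm hge this
        exact absurd (this ▸ hqS) hndvd
    have ha' : 0 < a * Nat.totient (p ^ (k' + 1)) :=
      Nat.mul_pos ha (Nat.totient_pos.mpr (pow_pos (by omega : 0 < p) _))
    have := IH (by omega) hSpos hfac' (a * Nat.totient (p ^ (k' + 1))) ha' hstep
    rw [this]
    have hcop : Nat.Coprime (p ^ (k' + 1)) S :=
      Nat.Coprime.pow_left _ ((Nat.Prime.coprime_iff_not_dvd hpprime).mpr hndvd)
    rw [hxS, mul_comm S (p ^ (k' + 1)), Nat.totient_mul hcop]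
    ring
  | case2 x r p h h2 IH =>
    intro hp hx hfac a ha hr
    rw [pvPhiLoop, dif_pos h, if_neg h2]
    have hfac' : ∀ q, Nat.Prime q → q ∣ x → p + 1 ≤ q := by
      intro q hq hqx
      have := hfac q hq hqx
      rcases Nat.lt_or_ge p q with hlt | hge
      · omega
      · have : q = p := le_antisymm hge this
        exact absurd (Nat.mod_eq_zero_of_dvd (this ▸ hqx)) h2
    exact IH (by omega) hx hfac' a ha hr
  | case3 x r p h =>
    intro hp hx hfac a ha hr
    rw [pvPhiLoop, dif_neg h]
    have hxlt : x < p * p := by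
      by_contra hc
      exact h ⟨by omega, hp⟩
    by_cases hx1 : x = 1
    · subst hx1
      simp [pvFinish, Nat.totient_one, hr]
    · -- x has all prime factors ≥ p and x < p², so x is prime
      have hx2 : 2 ≤ x := by omega
      have hm := Nat.minFac_prime hx1
      have hmd := Nat.minFac_dvd x
      have hpm : p ≤ x.minFac := hfac _ hm hmd
      have hxm : x = x.minFac := by
        by_contra hne
        have hdivpos : 0 < x / x.minFac :=
          Nat.div_pos (Nat.minFac_le hx) (Nat.minFac_pos x)
        have hdiv1 : x / x.minFac ≠ 1 := by
          intro h1
          apply hne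
          have := Nat.div_mul_cancel hmd
          rw [h1, one_mul] at this
          omega
        have hq' := Nat.minFac_prime hdiv1
        have hq'x : (x / x.minFac).minFac ∣ x :=
          (Nat.minFac_dvd _).trans (Nat.div_dvd_of_dvd hmd)
        have hpq' : p ≤ (x / x.minFac).minFac := hfac _ hq' hq'x
        have hq'le : (x / x.minFac).minFac ≤ x / x.minFac := Nat.minFac_le hdivpos
        have : p * p ≤ x.minFac * (x / x.minFac) :=
          Nat.mul_le_mul hpm (le_trans hpq' hq'le)
        rw [Nat.mul_div_cancel' hmd] at this
        omega
      have hxprime : x.Prime := hxm ▸ hm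
      have h1x : 1 < x := by omega
      simp only [pvFinish, if_pos h1x]
      rw [hr, Nat.mul_div_cancel _ (by omega : 0 < x), Nat.totient_prime hxprime,
        Nat.mul_sub, mul_one]

lemma pvPhiNat_eq_totient (m : Nat) (hm : 0 < m) : pvPhiNat m = Nat.totient m := by
  have := pvPhiLoop_spec m m 2 le_rfl hm (fun q hq _ => hq.two_le) 1 one_pos (one_mul m).symm
  simpa [pvPhiNat, pvFinish] using this

-- the gcd-count over 1..m equals φ(m): Mathlib counts coprimes in any window of length m
lemma count_range_gcd (m : Nat) :
    (List.range m).countP (fun k => Nat.gcd (1 + k) m == 1) = Nat.totient m := by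
  rw [← Nat.filter_coprime_Ico_eq_totient m 1]
  have hcard : ((Finset.range m).filter (fun k => Nat.gcd (1 + k) m = 1)).card
      = ((Finset.Ico 1 (1 + m)).filter (fun y => m.Coprime y)).card := by
    apply Finset.card_bij' (fun k _ => 1 + k) (fun y _ => y - 1)
    · intro k _; omega
    · intro y hy
      simp only [Finset.mem_filter, Finset.mem_Ico] at hy
      omega
    · intro k hk
      simp only [Finset.mem_filter, Finset.mem_range] at hk
      simp only [Finset.mem_filter, Finset.mem_Ico]
      exact ⟨⟨by omega, by omega⟩, Nat.coprime_comm.mp hk.2⟩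
    · intro y hy
      simp only [Finset.mem_filter, Finset.mem_Ico] at hy
      simp only [Finset.mem_filter, Finset.mem_range]
      constructor
      · omega
      · have h1y : 1 + (y - 1) = y := by omega
        rw [h1y]
        exact Nat.coprime_comm.mp hy.2
  rw [← hcard, List.countP_eq_length_filter]
  rfl

lemma pvCountA_eq (x : Int) (hx : 1 ≤ x) : pvCountA x = (Nat.totient x.toNat : Int) := by
  unfold pvCountA
  rw [PySem.List.pyRange_one]
  have h1 : (x + 1 - 1).toNat = x.toNat := by omega
  rw [h1, List.countP_map]
  congr 1
  rw [← count_range_gcd x.toNat]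
  apply List.countP_congr
  intro k _
  simp only [Function.comp]
  have hg : Int.gcd (1 + (k : Int)) x = Nat.gcd (1 + k) x.toNat := by
    unfold Int.gcd
    congr 1 <;> omega
  rw [hg]

lemma pvPhi_eq (x : Int) (hx : 1 ≤ x) : pvPhi x = pvCountA x := by
  rw [pvCountA_eq x hx]
  unfold pvPhi
  rw [pvPhiNat_eq_totient x.toNat (by omega)]

lemma pvLoopA_all (n : Int) (xs : List Int) (hxs : ∀ x ∈ xs, 1 ≤ x) :
    pvLoopA n xs = xs.all (fun x => pvPhi x != n) := by
  induction xs with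
  | nil => rfl
  | cons x rest IH =>
    have hx : 1 ≤ x := hxs x (by simp)
    rw [pvLoopA, List.all_cons, IH (fun y hy => hxs y (by simp [hy]))]
    by_cases hc : pvCountA x = n
    · simp [hc, pvPhi_eq x hx, bne]
    · simp [hc, pvPhi_eq x hx, bne]

-- ===== VERDICT (by name: the statement is the Claim_ definition above) =====
theorem is_nontotient_spec : Claim_equal_is_nontotient := by
  intro n _
  show is_nontotient n = is_nontotient_alt n
  unfold is_nontotient is_nontotient_alt
  by_cases hg : n ≠ 1 ∧ PySem.Int.mod n 2 ≠ 0
  · rw [if_pos hg, if_pos hg]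
  · rw [if_neg hg, if_neg hg]
    apply pvLoopA_all
    intro x hx
    exact (PySem.List.mem_pyRange_one.mp hx).1
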